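-- pv_equiv track=rewrite | github.com/James-S-007/Robotic-Scrabble | rpi/robotic_scrabble/AI.py | evaluate_moves
-- ===== SOURCE A (Python) =====
-- def evaluate_moves(moves):
--     if len(moves) == 0:
--         return []
--     longest = moves[0]
--     for item in moves:
--         if item == []:
--             continue
--         if longest == [] or len(item[0]) > len(longest[0]):
--             longest = item
--
--     return longest
-- ===== SOURCE B (Python) =====
-- def evaluate_moves(moves):
--     if len(moves) == 0:
--         return []
--     return sorted(moves, key=lambda item: -1 if item == [] else len(item[0]), reverse=True)[0]
-- ===== Notes on version B (the rewrite author's own statement) =====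
-- stated objective: simpler
-- what changed: The hand-written scan (skip-empty loop with a 'longest' accumulator and a short-circuit tie-break) is replaced by one stable descending sort on the length-of-first-word key (-1 for empty moves) followed by taking the front element; stability reproduces A's first-among-ties choice.
import Mathlib
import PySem

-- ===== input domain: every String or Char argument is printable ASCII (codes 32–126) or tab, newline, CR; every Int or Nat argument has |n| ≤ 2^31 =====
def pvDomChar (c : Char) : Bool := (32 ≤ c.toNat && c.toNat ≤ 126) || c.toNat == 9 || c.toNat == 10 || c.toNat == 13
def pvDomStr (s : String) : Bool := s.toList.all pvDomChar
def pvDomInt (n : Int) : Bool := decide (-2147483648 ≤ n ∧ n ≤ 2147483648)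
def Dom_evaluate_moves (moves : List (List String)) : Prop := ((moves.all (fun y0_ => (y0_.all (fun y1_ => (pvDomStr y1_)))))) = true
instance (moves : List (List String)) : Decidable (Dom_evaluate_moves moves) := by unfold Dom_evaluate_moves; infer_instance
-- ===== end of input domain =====

-- B replaces A's hand-written skip-empty max scan by one stable descending sort on the
-- length-of-first-word key (−1 for []) and takes the front element (objective: simpler).


-- ===== PORT A =====
-- the loop body: 'if item == []: continue; if longest == [] or len(item[0]) > len(longest[0]): longest = item'
-- (item[0]/longest[0] are taken by the nonempty match arm, exactly where Python's short-circuit reaches them)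
def evalStepA (longest item : List String) : List String :=
  match item with
  | [] => longest
  | w :: _ =>
    match longest with
    | [] => item
    | l :: _ => if PySem.Str.len l < PySem.Str.len w then item else longest

def evaluate_moves (moves : List (List String)) : List String :=
  if moves.length = 0 then []
  else moves.foldl evalStepA moves.headI   -- longest = moves[0]; headI is exact: length ≠ 0 here

-- ===== PORT B =====
-- lambda item: -1 if item == [] else len(item[0])
def evalKeyB (item : List String) : Int :=
  if item = [] then -1 else PySem.Str.len item.headI   -- item[0] guarded by the == [] test

def evaluate_moves_alt (moves : List (List String)) : List String :=
  if moves.length = 0 then []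
  else (PySem.List.sorted moves evalKeyB true).headI   -- [0] is exact: sorted of a nonempty list is nonempty

-- ===== PRECONDITION & SPEC =====
def Spec_evaluate_moves (moves : List (List String)) (out : List String) : Prop := out = evaluate_moves_alt moves
instance (moves : List (List String)) (out : List String) : Decidable (Spec_evaluate_moves moves out) := by unfold Spec_evaluate_moves; infer_instance

-- ===== CLAIM (what is proved, stated in full; the proofs are below) =====
def Claim_equal_evaluate_moves : Prop := ∀ (moves : List (List String)), Dom_evaluate_moves moves → Spec_evaluate_moves moves (evaluate_moves moves)

-- ===== LEMMAS AND PROOFS =====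

-- A's loop body is exactly "keep the element with the strictly larger B-key"
lemma evalStepA_eq_key (l i : List String) :
    evalStepA l i = if evalKeyB l < evalKeyB i then i else l := by
  cases i with
  | nil =>
    cases l with
    | nil => simp [evalStepA, evalKeyB]
    | cons a t =>
      simp only [evalStepA, evalKeyB, if_neg (List.cons_ne_nil a t), reduceIte]
      rw [if_neg]
      have : (0:Int) ≤ PySem.Str.len (a :: t).headI := Int.zero_le_ofNat _
      omega
  | cons w tw =>
    cases l with
    | nil =>
      simp only [evalStepA, evalKeyB, if_neg (List.cons_ne_nil w tw), reduceIte]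
      rw [if_pos]
      have : (0:Int) ≤ PySem.Str.len (w :: tw).headI := Int.zero_le_ofNat _
      omega
    | cons a t =>
      simp [evalStepA, evalKeyB, List.headI]

lemma insertBy_ne_nil {α : Type} (before : α → α → Bool) (x : α) (ys : List α) :
    PySem.List.insertBy before x ys ≠ [] := by
  cases ys with
  | nil => simp [PySem.List.insertBy]
  | cons y t =>
    simp only [PySem.List.insertBy]
    split <;> simp

lemma headI_insertBy {α : Type} [Inhabited α] (before : α → α → Bool) (x : α) (ys : List α)
    (h : ys ≠ []) :
    (PySem.List.insertBy before x ys).headI = if before x ys.headI then x else ys.headI := by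
  cases ys with
  | nil => exact absurd rfl h
  | cons y t =>
    simp only [PySem.List.insertBy]
    split <;> simp_all [List.headI]

-- the head of an insertion-sort accumulator evolves by the strict-comparison scan
lemma headI_foldl_insertBy {α : Type} [Inhabited α] (before : α → α → Bool)
    (xs : List α) (acc : List α) (h : acc ≠ []) :
    (xs.foldl (fun a x => PySem.List.insertBy before x a) acc).headI
      = xs.foldl (fun cur x => if before x cur then x else cur) acc.headI := by
  induction xs generalizing acc with
  | nil => rfl
  | cons x xs ih =>
    simp only [List.foldl_cons]
    rw [ih _ (insertBy_ne_nil before x acc), headI_insertBy before x acc h]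

theorem evaluate_moves_equal (moves : List (List String)) :
    evaluate_moves moves = evaluate_moves_alt moves := by
  cases moves with
  | nil => rfl
  | cons m rest =>
    simp only [evaluate_moves, evaluate_moves_alt, List.length_cons,
      if_neg (Nat.succ_ne_zero rest.length)]
    rw [PySem.List.sorted_rev_eq_foldl_insertBy]
    simp only [List.foldl_cons]
    rw [show PySem.List.insertBy (fun a b => decide (evalKeyB b < evalKeyB a)) m [] = [m] from rfl]
    rw [headI_foldl_insertBy _ rest [m] (by simp)]
    simp only [List.headI]
    rw [show evalStepA m m = m by rw [evalStepA_eq_key]; simp]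
    exact PySem.List.foldl_congr_mem rest _ _ m (fun l i _ => by rw [evalStepA_eq_key]; simp)

-- ===== VERDICT (by name: the statement is the Claim_ definition above) =====
theorem evaluate_moves_spec : Claim_equal_evaluate_moves := by
  intro moves _
  exact evaluate_moves_equal moves
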